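-- pv_equiv track=rewrite | github.com/oksanaShafransky/StockAnalyzer | strategy_analyzer/utils.py | calculate_consecutive_days2
-- ===== SOURCE A (Python) =====
-- def calculate_consecutive_days2(series):
--     consecutive_days = []
--     current_streak = 0
--
--     for val in series:
--         if val > 0:
--             current_streak += 1
--         else:
--             current_streak = 0
--         consecutive_days.append(current_streak)
--
--     return consecutive_days
-- ===== SOURCE B (Python) =====
-- from itertools import groupby
--
-- def calculate_consecutive_days2(series):
--     out = []
--     for pos, grp in groupby(series, key=lambda x: x > 0):
--         n = sum(1 for _ in grp)
--         out.extend(range(1, n + 1) if pos else [0] * n)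
--     return out
-- ===== Notes on version B (the rewrite author's own statement) =====
-- stated objective: alternative
-- what changed: Replaces the flat running-counter loop with a group-then-expand pass: itertools.groupby partitions the series into maximal runs keyed by x>0, each positive run expands to range(1,len+1) and each non-positive run to zeros.
import Mathlib
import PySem

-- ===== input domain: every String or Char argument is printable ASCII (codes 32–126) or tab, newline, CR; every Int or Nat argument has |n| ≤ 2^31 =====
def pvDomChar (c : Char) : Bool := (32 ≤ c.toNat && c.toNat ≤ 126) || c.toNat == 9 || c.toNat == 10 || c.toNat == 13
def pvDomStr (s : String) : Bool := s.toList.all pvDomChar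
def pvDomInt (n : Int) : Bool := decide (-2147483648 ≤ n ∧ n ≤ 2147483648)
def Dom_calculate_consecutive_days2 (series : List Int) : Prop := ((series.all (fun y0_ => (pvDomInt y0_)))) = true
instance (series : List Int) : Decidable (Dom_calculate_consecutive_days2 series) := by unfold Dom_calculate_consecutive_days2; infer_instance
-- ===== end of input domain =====

-- B replaces A's flat running-counter loop with a group-then-expand traversal
-- (maximal runs keyed by x>0); objective: alternative decomposition, same cost.


-- ===== PORT A =====
-- literal port of A: fold the running streak through the list, appending each value
def calculate_consecutive_days2 (series : List Int) : List Int :=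
  (series.foldl
    (fun (st : Int × List Int) val =>
      let cur := if val > 0 then st.1 + 1 else (0 : Int)
      (cur, st.2 ++ [cur]))
    (0, [])).2

-- ===== PORT B =====
-- groupby step: length of the maximal prefix whose key (x>0) equals p, plus the rest
def pvRunLen (p : Bool) : List Int → Nat × List Int
  | [] => (0, [])
  | x :: xs =>
    if decide (x > 0) = p then
      let r := pvRunLen p xs
      (r.1 + 1, r.2)
    else (0, x :: xs)

theorem pvRunLen_length (p : Bool) : ∀ xs : List Int, (pvRunLen p xs).2.length ≤ xs.length := by
  intro xs
  induction xs with
  | nil => simp [pvRunLen]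
  | cons x xs ih =>
    simp only [pvRunLen]
    split
    · exact le_trans ih (Nat.le_succ _)
    · simp

-- expand one group: 1..n for a positive run, n zeros otherwise
def pvExpand (p : Bool) (n : Nat) : List Int :=
  match p with
  | true => (List.range n).map (fun i : Nat => (i : Int) + 1)
  | false => List.replicate n 0

def calculate_consecutive_days2_alt (series : List Int) : List Int :=
  match series with
  | [] => []
  | x :: xs =>
    let p := decide (x > 0)
    let r := pvRunLen p xs
    pvExpand p (r.1 + 1) ++ calculate_consecutive_days2_alt r.2
  termination_by series.length
  decreasing_by
    exact Nat.lt_succ_of_le (pvRunLen_length _ xs)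

-- ===== PRECONDITION & SPEC =====
def Spec_calculate_consecutive_days2 (series : List Int) (out : List Int) : Prop := out = calculate_consecutive_days2_alt series
instance (series : List Int) (out : List Int) : Decidable (Spec_calculate_consecutive_days2 series out) := by unfold Spec_calculate_consecutive_days2; infer_instance

-- ===== CLAIM (what is proved, stated in full; the proofs are below) =====
def Claim_equal_calculate_consecutive_days2 : Prop := ∀ (series : List Int), Dom_calculate_consecutive_days2 series → Spec_calculate_consecutive_days2 series (calculate_consecutive_days2 series)

-- ===== LEMMAS AND PROOFS =====

-- reference running-streak recursion both ports are reduced to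
def pvGo (c : Int) : List Int → List Int
  | [] => []
  | x :: xs => if x > 0 then (c + 1) :: pvGo (c + 1) xs else (0 : Int) :: pvGo 0 xs

theorem pvA_foldl (xs : List Int) : ∀ (c : Int) (acc : List Int),
    (xs.foldl
      (fun (st : Int × List Int) val =>
        let cur := if val > 0 then st.1 + 1 else (0 : Int)
        (cur, st.2 ++ [cur]))
      (c, acc)).2 = acc ++ pvGo c xs := by
  induction xs with
  | nil => intro c acc; simp [pvGo]
  | cons x xs ih =>
    intro c acc
    by_cases h : x > 0 <;> simp [pvGo, h, ih]

theorem pvRunLen_cons_hit (p : Bool) (x : Int) (xs : List Int) (h : decide (x > 0) = p) :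
    pvRunLen p (x :: xs) = ((pvRunLen p xs).1 + 1, (pvRunLen p xs).2) := by
  simp [pvRunLen, h]

theorem pvRunLen_cons_miss (p : Bool) (x : Int) (xs : List Int) (h : ¬ decide (x > 0) = p) :
    pvRunLen p (x :: xs) = (0, x :: xs) := by
  simp [pvRunLen, h]

-- after a maximal positive run the rest is empty or starts non-positive
theorem pvRunLen_true_rest : ∀ xs : List Int,
    (pvRunLen true xs).2 = [] ∨ ∃ y t, (pvRunLen true xs).2 = y :: t ∧ ¬ y > 0 := by
  intro xs
  induction xs with
  | nil => left; rfl
  | cons x xs ih =>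
    by_cases h : x > 0
    · rw [pvRunLen_cons_hit true x xs (by simp [h])]; exact ih
    · right; exact ⟨x, xs, by rw [pvRunLen_cons_miss true x xs (by simp [h])], h⟩

theorem pvGo_irrel (c c' : Int) (xs : List Int)
    (h : xs = [] ∨ ∃ y t, xs = y :: t ∧ ¬ y > 0) : pvGo c xs = pvGo c' xs := by
  rcases h with h | ⟨y, t, rfl, hy⟩
  · subst h; rfl
  · simp [pvGo, hy]

theorem pvRangeMap_succ (n : Nat) (c : Int) :
    (List.range (n + 1)).map (fun i : Nat => c + 1 + (i : Int)) =
      (c + 1) :: (List.range n).map (fun i : Nat => c + 1 + 1 + (i : Int)) := by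
  rw [List.range_succ_eq_map, List.map_cons, List.map_map]
  refine congrArg₂ _ (by norm_num) (List.map_congr_left ?_)
  intro i _
  simp only [Function.comp]
  push_cast; ring

theorem pvGo_true_run : ∀ (xs : List Int) (c : Int),
    pvGo c xs =
      (List.range (pvRunLen true xs).1).map (fun i : Nat => c + 1 + (i : Int)) ++
        pvGo (c + (pvRunLen true xs).1) (pvRunLen true xs).2 := by
  intro xs
  induction xs with
  | nil => intro c; simp [pvGo, pvRunLen]
  | cons x xs ih =>
    intro c
    by_cases h : x > 0
    · rw [pvRunLen_cons_hit true x xs (by simp [h])]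
      simp only [pvGo, if_pos h, pvRangeMap_succ, List.cons_append]
      rw [ih (c + 1)]
      refine congrArg₂ _ rfl (congrArg₂ _ rfl (congrArg₂ _ (by push_cast; ring) rfl))
    · rw [pvRunLen_cons_miss true x xs (by simp [h])]
      simp

theorem pvGo_false_run : ∀ xs : List Int,
    pvGo 0 xs = List.replicate (pvRunLen false xs).1 0 ++ pvGo 0 (pvRunLen false xs).2 := by
  intro xs
  induction xs with
  | nil => simp [pvGo, pvRunLen]
  | cons x xs ih =>
    by_cases h : x > 0
    · rw [pvRunLen_cons_miss false x xs (by simp [h])]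
      simp
    · rw [pvRunLen_cons_hit false x xs (by simp [h])]
      simp only [pvGo, if_neg h, List.replicate_succ, List.cons_append]
      exact congrArg₂ _ rfl ih

theorem pvAlt_eq_go : ∀ (n : Nat) (xs : List Int), xs.length ≤ n →
    calculate_consecutive_days2_alt xs = pvGo 0 xs := by
  intro n
  induction n with
  | zero =>
    intro xs h
    have hx : xs = [] := List.eq_nil_of_length_eq_zero (Nat.le_zero.mp h)
    subst hx
    rw [calculate_consecutive_days2_alt]; rfl
  | succ n ih =>
    intro xs hlen
    match xs with
    | [] => rw [calculate_consecutive_days2_alt]; rfl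
    | x :: xs =>
      rw [calculate_consecutive_days2_alt]
      have hrest : (pvRunLen (decide (x > 0)) xs).2.length ≤ n := by
        have := pvRunLen_length (decide (x > 0)) xs
        simp at hlen; omega
      rw [ih _ hrest]
      by_cases h : x > 0
      · simp only [decide_eq_true h, pvExpand]
        rw [pvGo_irrel 0 ((0:Int) + 1 + ((pvRunLen true xs).1 : Int)) _ (pvRunLen_true_rest xs)]
        have hf : (fun i : Nat => (i : Int) + 1) = (fun i : Nat => (0:Int) + 1 + (i : Int)) := by
          funext i; ring
        rw [hf, pvRangeMap_succ]
        simp only [pvGo, if_pos h, List.cons_append]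
        rw [pvGo_true_run xs ((0:Int) + 1)]
      · simp only [decide_eq_false h, pvExpand]
        rw [List.replicate_succ, List.cons_append]
        simp only [pvGo, if_neg h]
        rw [pvGo_false_run xs]

-- ===== VERDICT (by name: the statement is the Claim_ definition above) =====
theorem calculate_consecutive_days2_spec : Claim_equal_calculate_consecutive_days2 := by
  intro series _
  unfold Spec_calculate_consecutive_days2 calculate_consecutive_days2
  rw [pvAlt_eq_go series.length series (le_refl _), pvA_foldl]
  simp
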